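-- pv_equiv track=rewrite | github.com/Shashank-Hegde/O-Health_LLM | dynamic_qs/dynamic_distil.py | extract_factors
-- ===== SOURCE A (Python) =====
-- factor_list = [
--     'exposure to rain', 'allergies', 'smoking', 'stress', 'recent travel',
--     'contact with sick person', 'poor diet', 'lack of sleep', 'physical exertion',
--     'exposure to cold weather', 'pollution', 'dust', 'pollen', 'pet dander'
-- ]
--
-- def extract_factors(text):
--     factors = []
--     for factor in factor_list:
--         if factor in text.lower():
--             factors.append(factor)
--     # Additional checks for keywords
--     if 'rain' in text.lower() or 'drenched' in text.lower() or 'wet' in text.lower():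
--         factors.append('exposure to rain')
--     if 'allerg' in text.lower():
--         factors.append('allergies')
--     if 'stress' in text.lower():
--         factors.append('stress')
--     if 'travel' in text.lower():
--         factors.append('recent travel')
--     return list(set(factors))
-- ===== SOURCE B (Python) =====
-- factor_list = [
--     'exposure to rain', 'allergies', 'smoking', 'stress', 'recent travel',
--     'contact with sick person', 'poor diet', 'lack of sleep', 'physical exertion',
--     'exposure to cold weather', 'pollution', 'dust', 'pollen', 'pet dander'
-- ]
--
-- # each special factor with the extra substrings that also trigger it
-- _TRIGGERS = [
--     ('exposure to rain', ['rain', 'drenched', 'wet']),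
--     ('allergies', ['allerg']),
--     ('stress', ['stress']),
--     ('recent travel', ['travel']),
-- ]
--
-- # every substring we ever look for: the 14 factor names plus the synonym triggers
-- _PATTERNS = factor_list + [t for _, ts in _TRIGGERS for t in ts]
--
-- def extract_factors(text):
--     low = text.lower()
--     # one left-to-right scan over the text: at each position mark every pattern starting there
--     matched = set()
--     for i in range(len(low) + 1):
--         for p in _PATTERNS:
--             if low.startswith(p, i):
--                 matched.add(p)
--     hits = [f for f in factor_list if f in matched]
--     hits += [fac for fac, trigs in _TRIGGERS if any(t in matched for t in trigs)]
--     return list(dict.fromkeys(hits))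
-- ===== Notes on version B (the rewrite author's own statement) =====
-- stated objective: alternative
-- what changed: B transposes the search: instead of A's 20 independent substring tests (each a fresh text.lower() scan) plus four special-case ifs, B lowercases once and makes a single left-to-right pass over the text positions, marking every pattern that starts at each position (a naive multi-pattern matcher), then emits factors from a trigger table and dedups in first-occurrence order.
import Mathlib
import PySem

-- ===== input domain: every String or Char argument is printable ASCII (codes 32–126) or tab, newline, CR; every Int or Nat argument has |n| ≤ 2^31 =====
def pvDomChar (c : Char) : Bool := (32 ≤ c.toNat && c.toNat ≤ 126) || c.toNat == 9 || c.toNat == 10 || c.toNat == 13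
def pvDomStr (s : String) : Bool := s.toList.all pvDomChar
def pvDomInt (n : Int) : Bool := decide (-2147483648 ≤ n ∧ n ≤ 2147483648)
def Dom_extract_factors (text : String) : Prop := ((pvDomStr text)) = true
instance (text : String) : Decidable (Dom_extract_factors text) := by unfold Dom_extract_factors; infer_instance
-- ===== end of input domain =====

-- B replaces A's 20 independent substring searches (each with a fresh lower()) by one
-- position scan over the lowered text marking every pattern that starts there, then a
-- table-driven emission with ordered dedup; equivalence is about the RETURN value
-- (Python's list(set(..)) iteration order is not modelled; both ports dedup keeping
-- first occurrences).

-- ===== PORT A =====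
def factor_list : List String :=
  ["exposure to rain", "allergies", "smoking", "stress", "recent travel",
   "contact with sick person", "poor diet", "lack of sleep", "physical exertion",
   "exposure to cold weather", "pollution", "dust", "pollen", "pet dander"]

def extract_factors (text : String) : List String :=
  let factors := factor_list.foldl
    (fun acc factor => if PySem.Str.isIn factor (PySem.Str.lower text) then acc ++ [factor] else acc) []
  let factors := if PySem.Str.isIn "rain" (PySem.Str.lower text)
      || PySem.Str.isIn "drenched" (PySem.Str.lower text)
      || PySem.Str.isIn "wet" (PySem.Str.lower text)
    then factors ++ ["exposure to rain"] else factors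
  let factors := if PySem.Str.isIn "allerg" (PySem.Str.lower text)
    then factors ++ ["allergies"] else factors
  let factors := if PySem.Str.isIn "stress" (PySem.Str.lower text)
    then factors ++ ["stress"] else factors
  let factors := if PySem.Str.isIn "travel" (PySem.Str.lower text)
    then factors ++ ["recent travel"] else factors
  PySem.Set.ofList factors

-- ===== PORT B =====
-- each special factor with the extra substrings that also trigger it
def triggersB : List (String × List String) :=
  [("exposure to rain", ["rain", "drenched", "wet"]),
   ("allergies", ["allerg"]),
   ("stress", ["stress"]),
   ("recent travel", ["travel"])]

-- every substring we ever look for: the 14 factor names plus the synonym triggers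
def patternsB : List String := factor_list ++ triggersB.flatMap (fun p => p.2)

-- 'low.startswith(p, i)' with 0 ≤ i is exactly 'low[i:].startswith(p)': ported as
-- PySem.Chars.startswith (low.drop i) p.toList (exact on this domain).
def extract_factors_alt (text : String) : List String :=
  let low := (PySem.Str.lower text).toList
  let matched := (List.range (low.length + 1)).foldl
    (fun m i => patternsB.foldl
      (fun m p => if PySem.Chars.startswith (low.drop i) p.toList then PySem.Set.add m p else m) m)
    PySem.Set.empty
  let hits := factor_list.filter (fun f => PySem.Set.contains matched f)
  let hits := hits ++
    (triggersB.filter (fun p => p.2.any (fun t => PySem.Set.contains matched t))).map (fun p => p.1)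
  PySem.List.dedup hits

-- ===== PRECONDITION & SPEC =====
def Spec_extract_factors (text : String) (out : List String) : Prop := out = extract_factors_alt text
instance (text : String) (out : List String) : Decidable (Spec_extract_factors text out) := by unfold Spec_extract_factors; infer_instance

-- ===== CLAIM (what is proved, stated in full; the proofs are below) =====
def Claim_equal_extract_factors : Prop := ∀ (text : String), Dom_extract_factors text → Spec_extract_factors text (extract_factors text)

-- ===== LEMMAS AND PROOFS =====

-- membership in the inner marking loop over a pattern list
theorem mem_markPats (low : List Char) (i : Nat) (pats : List String)
    (m : PySem.Set String) (y : String) :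
    y ∈ pats.foldl
      (fun m p => if PySem.Chars.startswith (low.drop i) p.toList then PySem.Set.add m p else m) m ↔
    y ∈ m ∨ (y ∈ pats ∧ PySem.Chars.startswith (low.drop i) y.toList = true) := by
  induction pats generalizing m with
  | nil => simp
  | cons p ps ih =>
    simp only [List.foldl_cons, ih]
    by_cases h : PySem.Chars.startswith (low.drop i) p.toList = true
    · simp only [h, if_pos, PySem.Set.mem_add, List.mem_cons]
      constructor
      · rintro ((hm | rfl) | ⟨hy, hs⟩)
        · exact Or.inl hm
        · exact Or.inr ⟨Or.inl rfl, h⟩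
        · exact Or.inr ⟨Or.inr hy, hs⟩
      · rintro (hm | ⟨(rfl | hy), hs⟩)
        · exact Or.inl (Or.inl hm)
        · exact Or.inl (Or.inr rfl)
        · exact Or.inr ⟨hy, hs⟩
    · simp only [if_neg h, List.mem_cons]
      constructor
      · rintro (hm | ⟨hy, hs⟩)
        · exact Or.inl hm
        · exact Or.inr ⟨Or.inr hy, hs⟩
      · rintro (hm | ⟨(rfl | hy), hs⟩)
        · exact Or.inl hm
        · exact absurd hs h
        · exact Or.inr ⟨hy, hs⟩

-- membership in the outer scan over a list of positions
theorem mem_markScan (low : List Char) (is : List Nat) (m : PySem.Set String) (y : String) :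
    y ∈ is.foldl
      (fun m i => patternsB.foldl
        (fun m p => if PySem.Chars.startswith (low.drop i) p.toList then PySem.Set.add m p else m) m) m ↔
    y ∈ m ∨ (y ∈ patternsB ∧ ∃ i ∈ is, PySem.Chars.startswith (low.drop i) y.toList = true) := by
  induction is generalizing m with
  | nil => simp
  | cons i is ih =>
    simp only [List.foldl_cons, ih, mem_markPats, List.mem_cons]
    constructor
    · rintro ((hm | ⟨hy, hs⟩) | ⟨hy, j, hj, hs⟩)
      · exact Or.inl hm
      · exact Or.inr ⟨hy, i, Or.inl rfl, hs⟩
      · exact Or.inr ⟨hy, j, Or.inr hj, hs⟩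
    · rintro (hm | ⟨hy, j, (rfl | hj), hs⟩)
      · exact Or.inl (Or.inl hm)
      · exact Or.inl (Or.inr ⟨hy, hs⟩)
      · exact Or.inr ⟨hy, j, hj, hs⟩

-- the scanned set answers exactly substring membership, for the patterns it tracks
theorem contains_matched (low : List Char) (y : String) (hy : y ∈ patternsB) :
    PySem.Set.contains
      ((List.range (low.length + 1)).foldl
        (fun m i => patternsB.foldl
          (fun m p => if PySem.Chars.startswith (low.drop i) p.toList then PySem.Set.add m p else m) m)
        PySem.Set.empty) y = PySem.Chars.isIn y.toList low := by
  rw [Bool.eq_iff_iff, PySem.Set.contains_iff, mem_markScan,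
    ← PySem.Chars.exists_prefix_drop_iff_isIn]
  simp only [PySem.Set.empty, List.not_mem_nil, false_or, List.mem_range,
    PySem.Chars.startswith_iff]
  constructor
  · rintro ⟨_, i, _, hs⟩; exact ⟨i, hs⟩
  · rintro ⟨j, hs⟩
    by_cases hj : j < low.length + 1
    · exact ⟨hy, j, hj, hs⟩
    · refine ⟨hy, low.length, by omega, ?_⟩
      rw [List.drop_length]
      rw [List.drop_eq_nil_of_le (by omega)] at hs
      simpa using hs

-- ===== VERDICT (by name: the statement is the Claim_ definition above) =====
theorem extract_factors_spec : Claim_equal_extract_factors := by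
  intro text _
  unfold Spec_extract_factors extract_factors extract_factors_alt
  have hc := contains_matched (PySem.Str.lower text).toList
  have hmem : ∀ f ∈ factor_list, f ∈ patternsB := by
    intro f hf; simp only [patternsB, List.mem_append]; exact Or.inl hf
  simp only [PySem.List.foldl_append_if_eq_filter, List.nil_append]
  simp only [PySem.Str.isIn_eq, PySem.List.dedup_eq_ofList, triggersB, List.filter,
    List.any, Bool.or_false]
  rw [List.filter_congr (fun f hf => (hc f (hmem f hf)).symm),
    ← hc "rain" (by decide), ← hc "drenched" (by decide), ← hc "wet" (by decide),
    ← hc "allerg" (by decide), ← hc "stress" (by decide), ← hc "travel" (by decide)]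
  set M := (List.range ((PySem.Str.lower text).toList.length + 1)).foldl
      (fun m i => patternsB.foldl
        (fun m p => if PySem.Chars.startswith ((PySem.Str.lower text).toList.drop i) p.toList
          then PySem.Set.add m p else m) m)
      PySem.Set.empty with hM
  have hf : List.filter M.contains factor_list = List.filter (fun f => decide (f ∈ M)) factor_list :=
    List.filter_congr (fun f _ => by simp)
  by_cases h1 : "rain" ∈ M <;>
  by_cases h2 : "drenched" ∈ M <;>
  by_cases h3 : "wet" ∈ M <;>
  by_cases h4 : "allerg" ∈ M <;>
  by_cases h5 : "stress" ∈ M <;>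
  by_cases h6 : "travel" ∈ M <;>
  simp [h1, h2, h3, h4, h5, h6, hf, List.append_assoc]
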